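-- pv_equiv track=rewrite | github.com/Flissel/swe_desgine | requirements_engineer/stages/agents/screen_generator_agent.py | _select_diverse_stories
-- ===== SOURCE A (Python) =====
-- def _select_diverse_stories(stories: list, max_screens: int) -> list:
--     """Select stories covering different functional areas (Gap #10)."""
--     if len(stories) <= max_screens:
--         return list(stories)
--
--     CATEGORY_KEYWORDS = {
--         "auth": ["login", "register", "password", "auth", "2fa", "passkey", "signup"],
--         "messaging": ["message", "chat", "send", "receive", "group", "conversation"],
--         "profile": ["profile", "status", "picture", "about", "avatar", "account"],
--         "settings": ["setting", "preference", "config", "notification", "privacy"],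
--         "media": ["photo", "video", "image", "media", "upload", "gallery", "camera"],
--         "contacts": ["contact", "friend", "block", "invite", "address"],
--         "calls": ["call", "voice", "ring", "dial", "audio"],
--         "search": ["search", "find", "discover", "filter", "browse"],
--     }
--
--     categories: dict = {k: [] for k in CATEGORY_KEYWORDS}
--     categories["other"] = []
--
--     for story in stories:
--         title = (story.get("title", "") if isinstance(story, dict) else str(story)).lower()
--         placed = False
--         for cat, keywords in CATEGORY_KEYWORDS.items():
--             if any(kw in title for kw in keywords):
--                 categories[cat].append(story)
--                 placed = True
--                 break
--         if not placed:
--             categories["other"].append(story)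
--
--     result = []
--     non_empty = {k: v for k, v in categories.items() if v}
--     idx = {k: 0 for k in non_empty}
--
--     while len(result) < max_screens:
--         added = False
--         for cat in list(non_empty.keys()):
--             if len(result) >= max_screens:
--                 break
--             if idx[cat] < len(non_empty[cat]):
--                 result.append(non_empty[cat][idx[cat]])
--                 idx[cat] += 1
--                 added = True
--         if not added:
--             break
--
--     return result
-- ===== SOURCE B (Python) =====
-- CATEGORY_KEYWORDS = {
--     "auth": ["login", "register", "password", "auth", "2fa", "passkey", "signup"],
--     "messaging": ["message", "chat", "send", "receive", "group", "conversation"],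
--     "profile": ["profile", "status", "picture", "about", "avatar", "account"],
--     "settings": ["setting", "preference", "config", "notification", "privacy"],
--     "media": ["photo", "video", "image", "media", "upload", "gallery", "camera"],
--     "contacts": ["contact", "friend", "block", "invite", "address"],
--     "calls": ["call", "voice", "ring", "dial", "audio"],
--     "search": ["search", "find", "discover", "filter", "browse"],
-- }
-- _KW_LISTS = list(CATEGORY_KEYWORDS.values())
--
--
-- def _select_diverse_stories(stories: list, max_screens: int) -> list:
--     """Select stories covering different functional areas: decorate each story with
--     (rank within its keyword category, category index) and stable-sort by that key --
--     the sorted order IS the diverse (round-robin) order, no buckets needed."""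
--     if len(stories) <= max_screens:
--         return list(stories)
--
--     seen = {}      # category index -> how many stories of it decorated so far
--     keyed = []
--     for story in stories:
--         title = (story.get("title", "") if isinstance(story, dict) else str(story)).lower()
--         j = len(_KW_LISTS)
--         for i, kws in enumerate(_KW_LISTS):
--             if any(kw in title for kw in kws):
--                 j = i
--                 break
--         r = seen.get(j, 0)
--         seen[j] = r + 1
--         keyed.append((r, j, story))
--
--     keyed.sort(key=lambda t: (t[0], t[1]))
--     return [story for _, _, story in keyed[:max(0, max_screens)]]
-- ===== Notes on version B (the rewrite author's own statement) =====
-- stated objective: alternative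
-- what changed: A builds per-category bucket lists and emits them through a stateful while-loop round-robin with per-category index pointers over two dicts; B never builds buckets: it decorates each story in one pass with a (rank-within-its-category, category-index) key and a stable sort by that key produces the identical diverse order, then slices the first max_screens.
import Mathlib
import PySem

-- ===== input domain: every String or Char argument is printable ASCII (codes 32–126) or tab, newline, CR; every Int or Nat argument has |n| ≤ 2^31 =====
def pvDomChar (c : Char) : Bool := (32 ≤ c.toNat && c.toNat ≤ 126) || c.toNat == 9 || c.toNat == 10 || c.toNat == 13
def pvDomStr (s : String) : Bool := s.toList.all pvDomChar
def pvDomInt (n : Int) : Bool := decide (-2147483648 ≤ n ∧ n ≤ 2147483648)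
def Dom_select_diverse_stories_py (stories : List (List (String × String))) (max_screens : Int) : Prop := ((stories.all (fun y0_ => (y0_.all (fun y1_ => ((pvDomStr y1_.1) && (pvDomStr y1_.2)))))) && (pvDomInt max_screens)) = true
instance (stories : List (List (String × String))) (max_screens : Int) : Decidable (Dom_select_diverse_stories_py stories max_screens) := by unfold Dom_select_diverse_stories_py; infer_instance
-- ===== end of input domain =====

-- B replaces A's bucket lists and stateful while/pointer round-robin loop by a Schwartzian
-- transform: decorate each story with (rank within its category, category index) in one pass
-- and stable-sort by that key; alternative decomposition, same cost.

-- shared module context: the CATEGORY_KEYWORDS table and the title/keyword test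
def pvCatKeywords : List (String × List String) :=
  [("auth", ["login", "register", "password", "auth", "2fa", "passkey", "signup"]),
   ("messaging", ["message", "chat", "send", "receive", "group", "conversation"]),
   ("profile", ["profile", "status", "picture", "about", "avatar", "account"]),
   ("settings", ["setting", "preference", "config", "notification", "privacy"]),
   ("media", ["photo", "video", "image", "media", "upload", "gallery", "camera"]),
   ("contacts", ["contact", "friend", "block", "invite", "address"]),
   ("calls", ["call", "voice", "ring", "dial", "audio"]),
   ("search", ["search", "find", "discover", "filter", "browse"])]

-- (story.get("title", "") ...).lower()  — the isinstance(story, dict) branch is the only one our type reaches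
def pvTitleLower (story : List (String × String)) : String :=
  PySem.Str.lower (PySem.Dict.getD (PySem.Dict.mk story) "title" "")

-- any(kw in title for kw in keywords)
def pvAnyKw (title : String) (kws : List String) : Bool :=
  kws.any (fun kw => PySem.Str.isIn kw title)

-- ===== PORT A =====
-- the categorization for-loop of A (dict keyed by category name)
def pvACategorize (stories : List (List (String × String))) :
    PySem.Dict String (List (List (String × String))) :=
  stories.foldl
    (fun cats story =>
      let title := pvTitleLower story
      match pvCatKeywords.find? (fun ck => pvAnyKw title ck.2) with
      | some ck => cats.modify ck.1 [] (· ++ [story])   -- categories[cat].append(story); break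
      | none => cats.modify "other" [] (· ++ [story]))
    (PySem.Dict.mk (pvCatKeywords.map (fun ck => (ck.1, ([] : List (List (String × String))))) ++ [("other", [])]))

-- the inner 'for cat in list(non_empty.keys())' pass (with its break on len(result) >= max_screens)
def pvForPass (ne : PySem.Dict String (List (List (String × String)))) (k : Int) :
    List String → PySem.Dict String Nat → List (List (String × String)) → Bool →
    (List (List (String × String)) × PySem.Dict String Nat × Bool)
  | [], idx, result, added => (result, idx, added)
  | cat :: rest, idx, result, added =>
    if k ≤ (result.length : Int) then (result, idx, added)     -- break
    else
      let i := idx.getD cat 0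
      let col := ne.getD cat []
      if h : i < col.length then
        pvForPass ne k rest (idx.insert cat (i + 1)) (result ++ [col[i]]) true
      else
        pvForPass ne k rest idx result added

-- the 'while len(result) < max_screens' loop (fuel bounds the rounds; each productive round adds ≥ 1)
def pvWhile (ne : PySem.Dict String (List (List (String × String)))) (k : Int) :
    Nat → PySem.Dict String Nat → List (List (String × String)) → List (List (String × String))
  | 0, _, result => result
  | fuel + 1, idx, result =>
    if (result.length : Int) < k then
      match pvForPass ne k ne.keys idx result false with
      | (result', idx', added) => if added then pvWhile ne k fuel idx' result' else result'
    else result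

def select_diverse_stories_py (stories : List (List (String × String))) (max_screens : Int) :
    List (List (String × String)) :=
  if (stories.length : Int) ≤ max_screens then stories
  else
    let categories := pvACategorize stories
    let nonEmpty := PySem.Dict.mk (categories.items.filter (fun kv => !kv.2.isEmpty))
    let idx := PySem.Dict.mk (nonEmpty.keys.map (fun c => (c, (0 : Nat))))
    pvWhile nonEmpty max_screens (stories.length + 1) idx []

-- ===== PORT B =====
-- _KW_LISTS = list(CATEGORY_KEYWORDS.values())
def pvKwLists : List (List String) :=
  [["login", "register", "password", "auth", "2fa", "passkey", "signup"],
   ["message", "chat", "send", "receive", "group", "conversation"],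
   ["profile", "status", "picture", "about", "avatar", "account"],
   ["setting", "preference", "config", "notification", "privacy"],
   ["photo", "video", "image", "media", "upload", "gallery", "camera"],
   ["contact", "friend", "block", "invite", "address"],
   ["call", "voice", "ring", "dial", "audio"],
   ["search", "find", "discover", "filter", "browse"]]

-- Source B's 'for i, kws in enumerate(_KW_LISTS): if any(...): j = i; break' (j defaults to len(_KW_LISTS))
def pvCatIdx (story : List (String × String)) : Nat :=
  pvKwLists.findIdx (fun kws => pvAnyKw (pvTitleLower story) kws)

-- one decoration step: r = seen.get(j, 0); seen[j] = r + 1; keyed.append((r, j, story))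
def pvDecStep (st : PySem.Dict Int Int × List (Int × Int × List (String × String)))
    (story : List (String × String)) :
    PySem.Dict Int Int × List (Int × Int × List (String × String)) :=
  let j : Int := (pvCatIdx story : Int)
  let r := st.1.getD j 0
  (st.1.insert j (r + 1), st.2 ++ [(r, j, story)])

def select_diverse_stories_py_alt (stories : List (List (String × String))) (max_screens : Int) :
    List (List (String × String)) :=
  if (stories.length : Int) ≤ max_screens then stories
  else
    let keyed := (stories.foldl pvDecStep (PySem.Dict.mk [], [])).2
    ((PySem.List.sorted2 keyed (fun t => t.1) (fun t => t.2.1)).take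
        (max 0 max_screens).toNat).map (fun t => t.2.2)

-- ===== PRECONDITION & SPEC =====
def Spec_select_diverse_stories_py (stories : List (List (String × String))) (max_screens : Int) (out : List (List (String × String))) : Prop := out = select_diverse_stories_py_alt stories max_screens
instance (stories : List (List (String × String))) (max_screens : Int) (out : List (List (String × String))) : Decidable (Spec_select_diverse_stories_py stories max_screens out) := by unfold Spec_select_diverse_stories_py; infer_instance

-- ===== CLAIM (what is proved, stated in full; the proofs are below) =====
def Claim_equal_select_diverse_stories_py : Prop := ∀ (stories : List (List (String × String))) (max_screens : Int), Dom_select_diverse_stories_py stories max_screens → Spec_select_diverse_stories_py stories max_screens (select_diverse_stories_py stories max_screens)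

-- ===== LEMMAS AND PROOFS =====

-- proof-side: the 9 buckets in category order (shared shape of both programs' categorization)
def pvBuckets (stories : List (List (String × String))) : List (List (List (String × String))) :=
  stories.foldl (fun bs story => bs.modify (pvCatIdx story) (· ++ [story]))
    (List.replicate (pvKwLists.length + 1) [])

-- proof-side: the category names in the order A's dict holds them
def pvNames : List String := pvCatKeywords.map (·.1) ++ ["other"]

theorem pvMap_if_not_mem {v : Type} (n : String) (x : String × v) :
    ∀ (l : List (String × v)), n ∉ l.map Prod.fst →
    l.map (fun p => if p.1 == n then x else p) = l := by
  intro l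
  induction l with
  | nil => simp
  | cons a t ih =>
    intro h
    simp only [List.map_cons, List.mem_cons, not_or] at h
    simp only [List.map_cons]
    rw [if_neg (by simp; exact fun he => h.1 he.symm), ih h.2]

theorem pvZip_map_set {v : Type} :
    ∀ (names : List String) (vs : List v) (j : Nat) (n : String) (x : v),
    names.Nodup → names.length = vs.length → names[j]? = some n →
    (names.zip vs).map (fun p => if p.1 == n then (n, x) else p) = names.zip (vs.set j x) := by
  intro names
  induction names with
  | nil => intro vs j n x _ _ h; simp at h
  | cons a t ih =>
    intro vs j n x hnd hlen hj
    cases vs with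
    | nil => simp at hlen
    | cons w ws =>
      cases j with
      | zero =>
        simp only [List.getElem?_cons_zero, Option.some.injEq] at hj
        subst hj
        simp only [List.zip_cons_cons, List.map_cons, List.set_cons_zero]
        rw [if_pos (by simp), pvMap_if_not_mem a (a, x) _ (by
          rw [List.map_fst_zip (le_of_eq (by simpa using hlen))]
          exact (List.nodup_cons.mp hnd).1)]
      | succ j' =>
        simp only [List.getElem?_cons_succ] at hj
        have hne : a ≠ n := by
          intro he
          exact (List.nodup_cons.mp hnd).1 (he ▸ List.mem_of_getElem? hj)
        simp only [List.zip_cons_cons, List.map_cons, List.set_cons_succ]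
        rw [if_neg (by simp [hne]), ih ws j' n x (List.nodup_cons.mp hnd).2 (by simpa using hlen) hj]

theorem pvMk_zip_modify {v : Type} (names : List String) (vs : List v) (j : Nat) (n : String)
    (d0 : v) (f : v → v) (hnd : names.Nodup) (hlen : names.length = vs.length)
    (hj : names[j]? = some n) :
    (PySem.Dict.mk (names.zip vs)).modify n d0 f = PySem.Dict.mk (names.zip (vs.modify j f)) := by
  have hjn : j < names.length := (List.getElem?_eq_some_iff.mp hj).choose
  have hjv : j < vs.length := by omega
  have hn : names[j] = n := by
    have := List.getElem?_eq_getElem hjn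
    rw [this] at hj; exact Option.some.inj hj
  have hmem : (n, vs[j]) ∈ names.zip vs := by
    refine List.mem_of_getElem? (i := j) ?_
    rw [List.getElem?_eq_getElem (by rw [List.length_zip]; omega), List.getElem_zip, hn]
  have hkeys : (PySem.Dict.mk (names.zip vs)).keys = names := by
    rw [PySem.Dict.keys_mk]
    exact List.map_fst_zip (le_of_eq hlen)
  have hnd' : (PySem.Dict.mk (names.zip vs)).keys.Nodup := by rw [hkeys]; exact hnd
  have hgetD : (PySem.Dict.mk (names.zip vs)).getD n d0 = vs[j] :=
    PySem.Dict.getD_of_mem_items _ hmem hnd' d0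
  have hcont : (PySem.Dict.mk (names.zip vs)).contains n = true := by
    rw [PySem.Dict.contains_iff_mem_keys, hkeys]
    exact List.mem_of_getElem? hj
  simp only [PySem.Dict.modify]
  apply PySem.Dict.ext
  rw [PySem.Dict.items_insert_of_contains _ _ hcont, hgetD]
  show (names.zip vs).map (fun p => if p.1 == n then (n, f vs[j]) else p) = names.zip (vs.modify j f)
  rw [List.modify_eq_set_get f hjv]
  exact pvZip_map_set names vs j n (f vs[j]) hnd hlen hj

theorem pvFind?_snd {a b : Type} (p : b → Bool) :
    ∀ (l : List (a × b)), l.find? (fun x => p x.2) = l[(l.map Prod.snd).findIdx p]? := by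
  intro l
  induction l with
  | nil => simp
  | cons q t ih =>
    by_cases hq : p q.2
    · simp [hq, List.findIdx_cons]
    · simp only [List.find?_cons, hq, List.map_cons, List.findIdx_cons, cond_false,
        List.getElem?_cons_succ]
      exact ih

theorem pvCategorize_aux :
    ∀ (stories : List (List (String × String))) (bs : List (List (List (String × String)))),
    bs.length = 9 →
    stories.foldl (fun cats story =>
        let title := pvTitleLower story
        match pvCatKeywords.find? (fun ck => pvAnyKw title ck.2) with
        | some ck => cats.modify ck.1 [] (· ++ [story])
        | none => cats.modify "other" [] (· ++ [story]))
      (PySem.Dict.mk (pvNames.zip bs))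
    = PySem.Dict.mk (pvNames.zip (stories.foldl (fun bs story =>
        bs.modify (pvCatIdx story) (· ++ [story])) bs)) := by
  intro stories
  induction stories with
  | nil => intro bs _; rfl
  | cons s t ih =>
    intro bs hlen
    rw [List.foldl_cons, List.foldl_cons]
    have hstep : (let title := pvTitleLower s
          match pvCatKeywords.find? (fun ck => pvAnyKw title ck.2) with
          | some ck => (PySem.Dict.mk (pvNames.zip bs)).modify ck.1 [] (· ++ [s])
          | none => (PySem.Dict.mk (pvNames.zip bs)).modify "other" [] (· ++ [s]))
        = PySem.Dict.mk (pvNames.zip (bs.modify (pvCatIdx s) (· ++ [s]))) := by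
      show (match pvCatKeywords.find? (fun ck => pvAnyKw (pvTitleLower s) ck.2) with
            | some ck => (PySem.Dict.mk (pvNames.zip bs)).modify ck.1 [] (· ++ [s])
            | none => (PySem.Dict.mk (pvNames.zip bs)).modify "other" [] (· ++ [s]))
          = _
      have hj8 : pvCatIdx s ≤ 8 := by
        have := List.findIdx_le_length (p := fun kws => pvAnyKw (pvTitleLower s) kws)
          (xs := pvKwLists)
        simpa [pvCatIdx] using this
      have hfind : pvCatKeywords.find? (fun ck => pvAnyKw (pvTitleLower s) ck.2)
          = pvCatKeywords[pvCatIdx s]? := by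
        have h1 := pvFind?_snd (fun kws => pvAnyKw (pvTitleLower s) kws) pvCatKeywords
        have h2 : pvCatKeywords.map Prod.snd = pvKwLists := by rfl
        rw [h2] at h1
        exact h1
      rcases Nat.lt_or_ge (pvCatIdx s) 8 with hlt | hge
      · have hsome : pvCatKeywords[pvCatIdx s]? = some pvCatKeywords[pvCatIdx s] :=
          List.getElem?_eq_getElem (by show _ < 8; omega)
        rw [hfind, hsome]
        apply pvMk_zip_modify pvNames bs _ _ [] _ (by decide) (by rw [hlen]; rfl)
        show (pvCatKeywords.map (·.1) ++ ["other"])[_]? = _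
        rw [List.getElem?_append_left (by show _ < 8; omega), List.getElem?_map,
          List.getElem?_eq_getElem (by show _ < 8; omega)]
        rfl
      · have hj : pvCatIdx s = 8 := by omega
        rw [hfind, hj]
        have hnone : pvCatKeywords[(8 : Nat)]? = none := by rfl
        rw [hnone]
        exact pvMk_zip_modify pvNames bs 8 "other" [] _ (by decide) (by rw [hlen]; rfl) (by rfl)
    rw [hstep]
    exact ih _ (by rw [List.length_modify]; exact hlen)

theorem pvCategorize_eq (stories : List (List (String × String))) :
    pvACategorize stories = PySem.Dict.mk (pvNames.zip (pvBuckets stories)) := by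
  unfold pvACategorize pvBuckets
  have hinit : (pvCatKeywords.map (fun ck => (ck.1, ([] : List (List (String × String))))) ++ [("other", [])])
      = pvNames.zip (List.replicate 9 []) := by rfl
  rw [hinit]
  have hrep : List.replicate (pvKwLists.length + 1) ([] : List (List (String × String)))
      = List.replicate 9 [] := rfl
  rw [hrep]
  exact pvCategorize_aux stories (List.replicate 9 []) (by simp)

-- termination helper for the column-major transpose below
theorem pvSumLen_tails_lt {α : Type} (cols : List (List α)) (h : ¬ cols.all List.isEmpty) :
    ((cols.map (·.drop 1)).map List.length).sum < (cols.map List.length).sum := by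
  induction cols with
  | nil => simp at h
  | cons c cs ih =>
    by_cases hc : c.isEmpty
    · have hcs : ¬ cs.all List.isEmpty := by simpa [hc] using h
      have := ih hcs
      have hde : (c.drop 1).length ≤ c.length := by simp
      simp only [List.map_cons, List.sum_cons]
      omega
    · have hlt : (c.drop 1).length < c.length := by
        cases c with
        | nil => simp at hc
        | cons x xs => simp
      have hle : ((cs.map (·.drop 1)).map List.length).sum ≤ (cs.map List.length).sum := by
        clear h hc hlt ih
        induction cs with
        | nil => simp
        | cons d ds ihd =>
          simp only [List.map_cons, List.sum_cons]
          have : (d.drop 1).length ≤ d.length := by simp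
          omega
      simp only [List.map_cons, List.sum_cons]
      omega

-- proof-side: column-major read of a list of columns (what A's round-robin loop emits)
def pvFlatZL {α : Type} (cols : List (List α)) : List α :=
  if h : cols.all List.isEmpty then []
  else cols.filterMap List.head? ++ pvFlatZL (cols.map (·.drop 1))
termination_by (cols.map List.length).sum
decreasing_by exact pvSumLen_tails_lt cols h

theorem pvAll_isEmpty_iff {α : Type} (T : List (List α)) :
    T.all List.isEmpty = true ↔ ∀ t ∈ T, t = [] := by
  simp [List.all_eq_true, List.isEmpty_iff]

theorem pvHeads_nil_iff {α : Type} (T : List (List α)) :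
    T.filterMap List.head? = [] ↔ ∀ t ∈ T, t = [] := by
  rw [List.filterMap_eq_nil_iff]
  simp [List.head?_eq_none_iff]

theorem pvFlatZL_eq_nil {α : Type} (T : List (List α)) (h : ∀ t ∈ T, t = []) :
    pvFlatZL T = [] := by
  rw [pvFlatZL, dif_pos ((pvAll_isEmpty_iff T).mpr h)]

theorem pvFlatZL_eq_cons {α : Type} (T : List (List α)) (h : ¬ ∀ t ∈ T, t = []) :
    pvFlatZL T = T.filterMap List.head? ++ pvFlatZL (T.map (·.drop 1)) := by
  rw [pvFlatZL, dif_neg (by simpa [pvAll_isEmpty_iff] using h)]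

theorem pvHeads_len_add {α : Type} : ∀ (T : List (List α)),
    (T.filterMap List.head?).length + ((T.map (·.drop 1)).map List.length).sum
      = (T.map List.length).sum := by
  intro T
  induction T with
  | nil => simp
  | cons t ts ih =>
    cases t with
    | nil => simpa [List.filterMap_cons] using ih
    | cons x xs =>
      have h1 : List.drop 1 (x :: xs) = xs := rfl
      simp only [List.filterMap_cons, List.head?_cons, List.map_cons, List.sum_cons,
        List.length_cons, h1]
      omega

theorem pvFlatZL_length {α : Type} (T : List (List α)) :
    (pvFlatZL T).length = (T.map List.length).sum := by
  generalize hs : (T.map List.length).sum = n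
  induction n using Nat.strong_induction_on generalizing T with
  | _ n ih =>
    by_cases hall : ∀ t ∈ T, t = []
    · rw [pvFlatZL_eq_nil T hall]
      have : ∀ t ∈ T, List.length t = 0 := fun t ht => by rw [hall t ht]; rfl
      simp only [List.length_nil, ← hs]
      induction T with
      | nil => simp
      | cons a b ihh => simp_all
    · rw [pvFlatZL_eq_cons T hall]
      have hlt := pvSumLen_tails_lt T (by simpa [pvAll_isEmpty_iff] using hall)
      rw [hs] at hlt
      rw [List.length_append, ih _ hlt (T.map (·.drop 1)) rfl]
      have := pvHeads_len_add T
      omega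

theorem pvFilter_zip_snd {α : Type} (q : α → Bool) :
    ∀ (l1 : List String) (l2 : List α), l1.length = l2.length →
    ((l1.zip l2).filter (fun p => q p.2)).map Prod.snd = l2.filter q := by
  intro l1
  induction l1 with
  | nil =>
    intro l2 h
    cases l2 with
    | nil => simp
    | cons w ws => simp at h
  | cons a t ih =>
    intro l2 h
    cases l2 with
    | nil => simp at h
    | cons w ws =>
      by_cases hq : q w <;>
        simp [hq, ih ws (by simpa using h)]

theorem pvGetD_mk_zero : ∀ (ks : List String) (n : String),
    (PySem.Dict.mk (ks.map (fun c => (c, (0 : Nat))))).getD n 0 = 0 := by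
  intro ks n
  induction ks with
  | nil => rfl
  | cons a t ih =>
    rw [List.map_cons, PySem.Dict.getD_eq_get?_getD, PySem.Dict.get?_mk_cons]
    split
    · rfl
    · rw [← PySem.Dict.getD_eq_get?_getD]
      exact ih

theorem pvForPass_spec (ne : PySem.Dict String (List (List (String × String)))) (k : Int) :
    ∀ (rest : List String) (idxD : PySem.Dict String Nat)
      (result : List (List (String × String))) (added : Bool), rest.Nodup →
    (pvForPass ne k rest idxD result added).1
      = result ++ ((rest.map (fun n => (ne.getD n []).drop (idxD.getD n 0))).filterMap List.head?).take (k - result.length).toNat ∧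
    (pvForPass ne k rest idxD result added).2.2
      = (added || decide (0 < (k - result.length).toNat ∧ (rest.map (fun n => (ne.getD n []).drop (idxD.getD n 0))).filterMap List.head? ≠ [])) ∧
    (((rest.map (fun n => (ne.getD n []).drop (idxD.getD n 0))).filterMap List.head?).length ≤ (k - result.length).toNat →
      ∀ m, (pvForPass ne k rest idxD result added).2.1.getD m 0
        = if m ∈ rest ∧ (ne.getD m []).drop (idxD.getD m 0) ≠ [] then idxD.getD m 0 + 1 else idxD.getD m 0) := by
  intro rest
  induction rest with
  | nil =>
    intro idxD result added _
    refine ⟨by simp [pvForPass], by simp [pvForPass], ?_⟩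
    intro _ m
    rw [if_neg (by simp)]
    simp [pvForPass]
  | cons cat rest' ih =>
    intro idxD result added hnd
    have hcat : cat ∉ rest' := (List.nodup_cons.mp hnd).1
    have hnd' : rest'.Nodup := (List.nodup_cons.mp hnd).2
    by_cases hk : k ≤ (result.length : Int)
    · have hb0 : (k - (result.length : Int)).toNat = 0 := by omega
      have hfp : pvForPass ne k (cat :: rest') idxD result added = (result, idxD, added) := by
        rw [pvForPass, if_pos hk]
      refine ⟨by rw [hfp, hb0]; simp, by rw [hfp, hb0]; simp, ?_⟩
      intro hlen m
      have hall : ∀ n ∈ cat :: rest', (ne.getD n []).drop (idxD.getD n 0) = [] := by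
        rw [hb0, Nat.le_zero, List.length_eq_zero_iff, pvHeads_nil_iff] at hlen
        intro n hn
        exact hlen _ (List.mem_map_of_mem hn)
      rw [hfp, if_neg (fun hc => hc.2 (hall m hc.1))]
    · have hklt : (result.length : Int) < k := by omega
      have hb0 : 0 < (k - (result.length : Int)).toNat := by omega
      by_cases hi : idxD.getD cat 0 < (ne.getD cat []).length
      · -- consume the head of this category
        have hfp : pvForPass ne k (cat :: rest') idxD result added
            = pvForPass ne k rest' (idxD.insert cat (idxD.getD cat 0 + 1))
                (result ++ [(ne.getD cat [])[idxD.getD cat 0]]) true := by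
          rw [pvForPass, if_neg hk, dif_pos hi]
        have hhead : ((ne.getD cat []).drop (idxD.getD cat 0)).head?
            = some (ne.getD cat [])[idxD.getD cat 0] := by
          rw [List.head?_drop, List.getElem?_eq_getElem hi]
        have hTrest : rest'.map (fun n => (ne.getD n []).drop ((idxD.insert cat (idxD.getD cat 0 + 1)).getD n 0))
            = rest'.map (fun n => (ne.getD n []).drop (idxD.getD n 0)) :=
          List.map_congr_left (fun n hn => by
            rw [PySem.Dict.getD_insert_of_ne _ _ _ (fun he : n = cat => hcat (by rw [← he]; exact hn))])
        obtain ⟨ih1, ih2, ih3⟩ := ih (idxD.insert cat (idxD.getD cat 0 + 1))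
          (result ++ [(ne.getD cat [])[idxD.getD cat 0]]) true hnd'
        rw [hTrest] at ih1 ih2 ih3
        have hlen' : ((result ++ [(ne.getD cat [])[idxD.getD cat 0]]).length : Int)
            = (result.length : Int) + 1 := by simp
        have hbsub : (k - ((result.length : Int) + 1)).toNat = (k - (result.length : Int)).toNat - 1 := by
          omega
        refine ⟨?_, ?_, ?_⟩
        · rw [hfp, ih1, hlen', hbsub]
          simp only [List.map_cons, List.filterMap_cons, hhead, List.append_assoc,
            List.singleton_append]
          obtain ⟨b', hb'⟩ : ∃ b', (k - (result.length : Int)).toNat = b' + 1 :=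
            ⟨(k - (result.length : Int)).toNat - 1, by omega⟩
          rw [hb']
          simp [List.take_succ_cons]
        · rw [hfp, ih2]
          simp only [List.map_cons, List.filterMap_cons, hhead, Bool.true_or]
          have hcond : 0 < (k - (result.length : Int)).toNat ∧
              ((ne.getD cat [])[idxD.getD cat 0] ::
                (rest'.map (fun n => (ne.getD n []).drop (idxD.getD n 0))).filterMap List.head?) ≠ [] :=
            ⟨hb0, by simp⟩
          rw [decide_eq_true hcond, Bool.or_true]
        · intro hlen m
          simp only [List.map_cons, List.filterMap_cons, hhead, List.length_cons] at hlen
          have hlen2 : ((rest'.map (fun n => (ne.getD n []).drop (idxD.getD n 0))).filterMap List.head?).length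
              ≤ (k - ((result ++ [(ne.getD cat [])[idxD.getD cat 0]]).length : Int)).toNat := by
            rw [hlen', hbsub]; omega
          rw [hfp, ih3 hlen2 m]
          by_cases hm : m = cat
          · subst hm
            rw [if_neg (fun hc => hcat hc.1), if_pos ⟨List.mem_cons_self, by
                rw [← List.length_pos_iff, List.length_drop]; omega⟩]
            rw [PySem.Dict.getD_insert_self]
          · rw [PySem.Dict.getD_insert_of_ne _ _ _ hm]
            by_cases hmr : m ∈ rest' ∧ (ne.getD m []).drop (idxD.getD m 0) ≠ []
            · rw [if_pos hmr, if_pos ⟨List.mem_cons_of_mem _ hmr.1, hmr.2⟩]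
            · rw [if_neg hmr, if_neg (fun hc => hmr ⟨(List.mem_cons.mp hc.1).resolve_left hm, hc.2⟩)]
      · -- this category is exhausted: skip
        have hfp : pvForPass ne k (cat :: rest') idxD result added
            = pvForPass ne k rest' idxD result added := by
          rw [pvForPass, if_neg hk, dif_neg hi]
        have htnil : (ne.getD cat []).drop (idxD.getD cat 0) = [] := by
          rw [List.drop_eq_nil_iff]; omega
        obtain ⟨ih1, ih2, ih3⟩ := ih idxD result added hnd'
        refine ⟨?_, ?_, ?_⟩
        · rw [hfp, ih1]
          simp [htnil]
        · rw [hfp, ih2]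
          simp [htnil]
        · intro hlen m
          simp only [List.map_cons, List.filterMap_cons, htnil, List.head?_nil] at hlen
          rw [hfp, ih3 hlen m]
          by_cases hm : m = cat
          · subst hm
            rw [if_neg (fun hc => hcat hc.1), if_neg (fun hc => hc.2 htnil)]
          · by_cases hmr : m ∈ rest' ∧ (ne.getD m []).drop (idxD.getD m 0) ≠ []
            · rw [if_pos hmr, if_pos ⟨List.mem_cons_of_mem _ hmr.1, hmr.2⟩]
            · rw [if_neg hmr, if_neg (fun hc => hmr ⟨(List.mem_cons.mp hc.1).resolve_left hm, hc.2⟩)]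

theorem pvWhile_done (ne : PySem.Dict String (List (List (String × String)))) (k : Int)
    (fuel : Nat) (idxD : PySem.Dict String Nat) (result : List (List (String × String)))
    (h : ¬ (result.length : Int) < k) :
    pvWhile ne k fuel idxD result = result := by
  cases fuel <;> simp [pvWhile, h]

theorem pvWhile_spec (ne : PySem.Dict String (List (List (String × String)))) (k : Int)
    (hnd : ne.keys.Nodup) :
    ∀ (fuel : Nat) (idxD : PySem.Dict String Nat) (result : List (List (String × String))),
    (pvFlatZL (ne.keys.map (fun n => (ne.getD n []).drop (idxD.getD n 0)))).length < fuel →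
    pvWhile ne k fuel idxD result
      = result ++ (pvFlatZL (ne.keys.map (fun n => (ne.getD n []).drop (idxD.getD n 0)))).take (k - result.length).toNat := by
  intro fuel
  induction fuel with
  | zero => intro idxD result h; exact absurd h (Nat.not_lt_zero _)
  | succ fuel ih =>
    intro idxD result hfuel
    set T := ne.keys.map (fun n => (ne.getD n []).drop (idxD.getD n 0)) with hTdef
    by_cases hk : (result.length : Int) < k
    · obtain ⟨h1, h2, h3⟩ := pvForPass_spec ne k ne.keys idxD result false hnd
      rcases hfp : pvForPass ne k ne.keys idxD result false with ⟨result', idx', added⟩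
      rw [hfp] at h1 h2 h3
      simp only at h1 h2 h3
      rw [← hTdef] at h1 h2 h3
      have hunfold : pvWhile ne k (fuel + 1) idxD result
          = if added then pvWhile ne k fuel idx' result' else result' := by
        rw [pvWhile, if_pos hk, hfp]
      by_cases hh : T.filterMap List.head? = []
      · have hT : ∀ t ∈ T, t = [] := (pvHeads_nil_iff T).mp hh
        have hadded : added = false := by
          rw [h2, Bool.false_or, decide_eq_false (fun hc => hc.2 hh)]
        rw [hunfold, hadded, if_neg (by simp), h1, hh, pvFlatZL_eq_nil T hT]
      · have hb0 : 0 < (k - (result.length : Int)).toNat := by omega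
        have hadded : added = true := by
          rw [h2, Bool.false_or, decide_eq_true ⟨hb0, hh⟩]
        have hnotall : ¬ ∀ t ∈ T, t = [] := fun hall => hh ((pvHeads_nil_iff T).mpr hall)
        have hflat : pvFlatZL T = T.filterMap List.head? ++ pvFlatZL (T.map (·.drop 1)) :=
          pvFlatZL_eq_cons T hnotall
        rw [hunfold, hadded, if_pos rfl]
        by_cases hble : (k - (result.length : Int)).toNat ≤ (T.filterMap List.head?).length
        · have hlenr : result'.length = result.length + (k - (result.length : Int)).toNat := by
            rw [h1]; simp [List.length_take]; omega
          have hdone : ¬ ((result'.length : Int) < k) := by omega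
          rw [pvWhile_done ne k fuel idx' result' hdone, h1, hflat, List.take_append]
          have hz : (k - (result.length : Int)).toNat - (T.filterMap List.head?).length = 0 := by
            omega
          rw [hz, List.take_zero, List.append_nil]
        · have hlt : (T.filterMap List.head?).length < (k - (result.length : Int)).toNat := by
            omega
          have hidx := h3 (by omega)
          have hT' : ne.keys.map (fun n => (ne.getD n []).drop (idx'.getD n 0))
              = T.map (·.drop 1) := by
            rw [hTdef, List.map_map]
            refine List.map_congr_left (fun n hn => ?_)
            show (ne.getD n []).drop (idx'.getD n 0) = ((ne.getD n []).drop (idxD.getD n 0)).drop 1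
            rw [hidx n]
            by_cases hcond : n ∈ ne.keys ∧ (ne.getD n []).drop (idxD.getD n 0) ≠ []
            · rw [if_pos hcond, List.drop_drop]
            · rw [if_neg hcond]
              have hnil : (ne.getD n []).drop (idxD.getD n 0) = [] := by
                by_contra hne
                exact hcond ⟨hn, hne⟩
              rw [hnil]
              rfl
          have hpos : 0 < (T.filterMap List.head?).length := by
            cases hcc : T.filterMap List.head? with
            | nil => exact absurd hcc hh
            | cons a l => simp
          have hfuel' : (pvFlatZL (T.map (·.drop 1))).length < fuel := by
            have hle := congrArg List.length hflat
            rw [List.length_append] at hle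
            omega
          have hlenr : result'.length = result.length + (T.filterMap List.head?).length := by
            rw [h1, List.take_of_length_le (le_of_lt hlt), List.length_append]
          have harith : (k - (result'.length : Int)).toNat
              = (k - (result.length : Int)).toNat - (T.filterMap List.head?).length := by
            omega
          rw [ih idx' result' (by rw [hT']; exact hfuel'), hT', harith, h1,
            List.take_of_length_le (le_of_lt hlt), hflat, List.take_append,
            List.append_assoc, List.take_of_length_le (le_of_lt hlt)]
    · rw [pvWhile_done ne k (fuel + 1) idxD result hk]
      have hz : (k - (result.length : Int)).toNat = 0 := by omega
      rw [hz, List.take_zero, List.append_nil]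

theorem pvSum_modify_append {α : Type} (x : α) :
    ∀ (bs : List (List α)) (j : Nat), j < bs.length →
    ((bs.modify j (· ++ [x])).map List.length).sum = (bs.map List.length).sum + 1 := by
  intro bs
  induction bs with
  | nil => intro j hj; simp at hj
  | cons b t ih =>
    intro j hj
    cases j with
    | zero => simp [List.modify_zero_cons]; omega
    | succ j' =>
      rw [List.modify_succ_cons]
      simp only [List.map_cons, List.sum_cons]
      rw [ih j' (by simpa using hj)]
      omega

theorem pvCatIdx_lt (s : List (String × String)) : pvCatIdx s < 9 := by
  have := List.findIdx_le_length (p := fun kws => pvAnyKw (pvTitleLower s) kws) (xs := pvKwLists)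
  have h8 : pvKwLists.length = 8 := rfl
  simp only [pvCatIdx]
  omega

theorem pvBuckets_aux : ∀ (stories : List (List (String × String)))
    (init : List (List (List (String × String)))), init.length = 9 →
    (stories.foldl (fun bs story => bs.modify (pvCatIdx story) (· ++ [story])) init).length = 9 ∧
    ((stories.foldl (fun bs story => bs.modify (pvCatIdx story) (· ++ [story])) init).map List.length).sum
      = (init.map List.length).sum + stories.length := by
  intro stories
  induction stories with
  | nil => intro init h; exact ⟨h, by simp⟩
  | cons s t ih =>
    intro init h
    rw [List.foldl_cons]
    have hj : pvCatIdx s < init.length := by rw [h]; exact pvCatIdx_lt s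
    obtain ⟨ih1, ih2⟩ := ih (init.modify (pvCatIdx s) (· ++ [s]))
      (by rw [List.length_modify]; exact h)
    refine ⟨ih1, ?_⟩
    rw [ih2, pvSum_modify_append s init _ hj]
    simp only [List.length_cons]
    omega

theorem pvBuckets_length (stories : List (List (String × String))) :
    (pvBuckets stories).length = 9 :=
  (pvBuckets_aux stories (List.replicate 9 []) (by simp)).1

theorem pvBuckets_sum (stories : List (List (String × String))) :
    ((pvBuckets stories).map List.length).sum = stories.length := by
  have := (pvBuckets_aux stories (List.replicate 9 []) (by simp)).2
  unfold pvBuckets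
  have hrep : List.replicate (pvKwLists.length + 1) ([] : List (List (String × String)))
      = List.replicate 9 [] := rfl
  rw [hrep, this]
  simp

theorem pvSum_filter_nonempty {α : Type} : ∀ (bs : List (List α)),
    ((bs.filter (fun b => !b.isEmpty)).map List.length).sum = (bs.map List.length).sum := by
  intro bs
  induction bs with
  | nil => simp
  | cons b t ih =>
    by_cases hb : b.isEmpty
    · have : b.length = 0 := by simpa [List.isEmpty_iff, List.length_eq_zero_iff] using hb
      simp [hb, ih, this]
    · simp [hb, ih]

-- ===== new B-side lemmas (decorate + stable sort = column-major flatten) =====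

-- a decorated column: the stories of category j, ranked
def pvDCol (stories : List (List (String × String))) (j : Nat) :
    List (Int × Int × List (String × String)) :=
  ((stories.filter (fun s => pvCatIdx s == j)).zipIdx).map (fun p => ((p.2 : Int), (j : Int), p.1))

def pvDCols (stories : List (List (String × String))) :
    List (List (Int × Int × List (String × String))) :=
  (List.range 9).map (pvDCol stories)

theorem pvSorted2_eq_sorted_lex {α : Type} (xs : List α) (k1 k2 : α → Int) :
    PySem.List.sorted2 xs k1 k2 = PySem.List.sorted xs (fun x => toLex (k1 x, k2 x)) := by
  have hfun : (fun a b => decide (k1 a < k1 b) || (!decide (k1 b < k1 a) && decide (k2 a < k2 b)))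
      = (fun a b => decide (toLex (k1 a, k2 a) < toLex (k1 b, k2 b))) := by
    funext a b
    rcases lt_trichotomy (k1 a) (k1 b) with h | h | h
    · simp [Prod.Lex.toLex_lt_toLex, h]
    · simp [Prod.Lex.toLex_lt_toLex, h]
    · simp only [Prod.Lex.toLex_lt_toLex]
      rw [decide_eq_false (lt_asymm h), decide_eq_true h]
      simp only [Bool.false_or, Bool.not_true, Bool.false_and]
      rw [decide_eq_false (by rintro (hc | ⟨hc, -⟩); exacts [lt_asymm h hc, ne_of_gt h hc])]
  show xs.foldl (fun acc x => PySem.List.insertBy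
      (fun a b => decide (k1 a < k1 b) || (!decide (k1 b < k1 a) && decide (k2 a < k2 b))) x acc) []
    = xs.foldl (fun acc x => PySem.List.insertBy
      (fun a b => decide (toLex (k1 a, k2 a) < toLex (k1 b, k2 b))) x acc) []
  rw [hfun]

theorem pvHeads_flatten_perm {α : Type} : ∀ (T : List (List α)),
    (T.filterMap List.head? ++ (T.map (·.drop 1)).flatten).Perm T.flatten := by
  intro T
  induction T with
  | nil => simp
  | cons c cs ih =>
    cases c with
    | nil => simpa using ih
    | cons x xs =>
      simp only [List.filterMap_cons, List.head?_cons, List.map_cons, List.flatten_cons,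
        List.drop_succ_cons, List.drop_zero, List.cons_append]
      refine List.Perm.cons x ?_
      exact (List.perm_append_comm_assoc _ _ _).trans (ih.append_left xs)

theorem pvFlatZL_perm_flatten {α : Type} (T : List (List α)) : (pvFlatZL T).Perm T.flatten := by
  generalize hs : (T.map List.length).sum = n
  induction n using Nat.strong_induction_on generalizing T with
  | _ n ih =>
    by_cases hall : ∀ t ∈ T, t = []
    · rw [pvFlatZL_eq_nil T hall, List.flatten_eq_nil_iff.mpr hall]
    · rw [pvFlatZL_eq_cons T hall]
      have hlt := pvSumLen_tails_lt T (by simpa [pvAll_isEmpty_iff] using hall)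
      rw [hs] at hlt
      exact ((ih _ hlt _ rfl).append_left _).trans (pvHeads_flatten_perm T)

theorem pvFlatZL_map {α β : Type} (f : α → β) (T : List (List α)) :
    pvFlatZL (T.map (List.map f)) = (pvFlatZL T).map f := by
  generalize hs : (T.map List.length).sum = n
  induction n using Nat.strong_induction_on generalizing T with
  | _ n ih =>
    by_cases hall : ∀ t ∈ T, t = []
    · rw [pvFlatZL_eq_nil T hall, pvFlatZL_eq_nil (T.map (List.map f))
        (by intro t ht; obtain ⟨c, hc, rfl⟩ := List.mem_map.mp ht; rw [hall c hc]; rfl)]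
      rfl
    · have hall' : ¬ ∀ t ∈ T.map (List.map f), t = [] := by
        intro hc
        refine hall (fun t ht => ?_)
        have := hc (t.map f) (List.mem_map_of_mem ht)
        simpa using this
      rw [pvFlatZL_eq_cons T hall, pvFlatZL_eq_cons _ hall']
      have hheads : (T.map (List.map f)).filterMap List.head?
          = (T.filterMap List.head?).map f := by
        rw [List.filterMap_map, List.map_filterMap]
        refine List.filterMap_congr (fun c _ => ?_)
        simp [Function.comp, List.head?_map]
      have htails : (T.map (List.map f)).map (·.drop 1)
          = (T.map (·.drop 1)).map (List.map f) := by
        simp only [List.map_map]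
        refine List.map_congr_left (fun c _ => ?_)
        simp
      have hlt := pvSumLen_tails_lt T (by simpa [pvAll_isEmpty_iff] using hall)
      rw [hs] at hlt
      rw [hheads, htails, ih _ hlt _ rfl, List.map_append]

theorem pvHeads_filter_ne {α : Type} : ∀ (T : List (List α)),
    (T.filter (fun c => !c.isEmpty)).filterMap List.head? = T.filterMap List.head? := by
  intro T
  induction T with
  | nil => rfl
  | cons c cs ih =>
    cases c with
    | nil => simpa [List.filter_cons, List.filterMap_cons] using ih
    | cons x xs => simp [ih]

theorem pvTails_filter_ne {α : Type} : ∀ (T : List (List α)),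
    ((T.filter (fun c => !c.isEmpty)).map (·.drop 1)).filter (fun c => !c.isEmpty)
      = (T.map (·.drop 1)).filter (fun c => !c.isEmpty) := by
  intro T
  induction T with
  | nil => rfl
  | cons c cs ih =>
    cases c with
    | nil => simpa [List.filter_cons] using ih
    | cons x xs =>
      have h1 : List.filter (fun c => !c.isEmpty) ((x :: xs) :: cs)
          = (x :: xs) :: List.filter (fun c => !c.isEmpty) cs := by
        simp
      rw [h1, List.map_cons, List.map_cons, List.filter_cons, List.filter_cons, ih]

theorem pvSum_filter_map_le {α : Type} (p : α → Bool) (f : α → Nat) : ∀ (T : List α),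
    ((T.filter p).map f).sum ≤ (T.map f).sum := by
  intro T
  induction T with
  | nil => simp
  | cons c cs ih =>
    by_cases hc : p c <;> simp [hc] <;> omega

theorem pvFlatZL_filter_ne {α : Type} (T : List (List α)) :
    pvFlatZL (T.filter (fun c => !c.isEmpty)) = pvFlatZL T := by
  generalize hs : (T.map List.length).sum = n
  induction n using Nat.strong_induction_on generalizing T with
  | _ n ih =>
    by_cases hall : ∀ t ∈ T, t = []
    · rw [pvFlatZL_eq_nil T hall,
        pvFlatZL_eq_nil _ (fun t ht => hall t (List.mem_of_mem_filter ht))]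
    · have hall' : ¬ ∀ t ∈ T.filter (fun c => !c.isEmpty), t = [] := by
        intro hc
        refine hall (fun t ht => ?_)
        by_cases he : t.isEmpty
        · exact List.isEmpty_iff.mp he
        · exact hc t (List.mem_filter.mpr ⟨ht, by simp [he]⟩)
      rw [pvFlatZL_eq_cons T hall, pvFlatZL_eq_cons _ hall', pvHeads_filter_ne]
      have hlt := pvSumLen_tails_lt T (by simpa [pvAll_isEmpty_iff] using hall)
      rw [hs] at hlt
      have hle : (((T.filter (fun c => !c.isEmpty)).map (·.drop 1)).map List.length).sum
          ≤ ((T.map (·.drop 1)).map List.length).sum := by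
        simp only [List.map_map]
        exact pvSum_filter_map_le (fun c => !c.isEmpty) _ T
      congr 1
      rw [← ih _ hlt _ rfl, ← ih _ (lt_of_le_of_lt hle hlt) _ rfl, pvTails_filter_ne]

theorem pvCons_flatten_perm {β : Type} (key : β → Int) (x : β) (t : List β) :
    ∀ (ids : List Int), ids.Nodup → key x ∈ ids →
    ((ids.map (fun j => (x :: t).filter (fun y => key y == j))).flatten).Perm
      (x :: (ids.map (fun j => t.filter (fun y => key y == j))).flatten) := by
  intro ids
  induction ids with
  | nil => intro _ h; simp at h
  | cons j rest ih =>
    intro hnd hmem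
    by_cases hj : key x == j
    · have hx : key x = j := by simpa using hj
      have hrest : rest.map (fun j' => (x :: t).filter (fun y => key y == j'))
          = rest.map (fun j' => t.filter (fun y => key y == j')) := by
        refine List.map_congr_left (fun j' hj' => ?_)
        rw [List.filter_cons, if_neg (by
          simp only [beq_iff_eq, hx]
          intro he
          exact (List.nodup_cons.mp hnd).1 (he ▸ hj'))]
      have heq : ((j :: rest).map (fun j' => (x :: t).filter (fun y => key y == j'))).flatten
          = x :: ((j :: rest).map (fun j' => t.filter (fun y => key y == j'))).flatten := by
        rw [List.map_cons, List.filter_cons, if_pos hj, hrest, List.map_cons,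
          List.flatten_cons, List.flatten_cons, List.cons_append]
      rw [heq]
    · have hmem' : key x ∈ rest := by
        rcases List.mem_cons.mp hmem with he | h
        · exact absurd (by simp [he]) hj
        · exact h
      have hih := ih (List.nodup_cons.mp hnd).2 hmem'
      have hhead : (x :: t).filter (fun y => key y == j) = t.filter (fun y => key y == j) := by
        rw [List.filter_cons, if_neg (by simpa using hj)]
      rw [List.map_cons, List.map_cons, List.flatten_cons, List.flatten_cons, hhead]
      exact (hih.append_left _).trans List.perm_middle

theorem pvPerm_flatten_filter {β : Type} (key : β → Int) :
    ∀ (l : List β) (ids : List Int), ids.Nodup → (∀ x ∈ l, key x ∈ ids) →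
    l.Perm ((ids.map (fun j => l.filter (fun x => key x == j))).flatten) := by
  intro l
  induction l with
  | nil => intro ids _ _; simp
  | cons x t ih =>
    intro ids hnd hx
    have h1 := pvCons_flatten_perm key x t ids hnd (hx x List.mem_cons_self)
    have h2 := ih ids hnd (fun y hy => hx y (List.mem_cons_of_mem _ hy))
    exact (h1.trans ((h2.symm.cons x))).symm

theorem pvFoldBuckets_eq : ∀ (stories : List (List (String × String)))
    (init : List (List (List (String × String)))), init.length = 9 →
    stories.foldl (fun bs story => bs.modify (pvCatIdx story) (· ++ [story])) init
      = (List.range 9).map (fun j => init.getD j [] ++ stories.filter (fun s => pvCatIdx s == j)) := by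
  intro stories
  induction stories with
  | nil =>
    intro init hlen
    rw [List.foldl_nil]
    refine List.ext_getElem (by simp [hlen]) (fun i h1 h2 => ?_)
    simp only [List.getElem_map, List.getElem_range, List.filter_nil, List.append_nil]
    rw [List.getD_eq_getElem?_getD, List.getElem?_eq_getElem (by rw [hlen]; simpa using h2)]
    rfl
  | cons s t ih =>
    intro init hlen
    rw [List.foldl_cons, ih _ (by rw [List.length_modify]; exact hlen)]
    refine List.map_congr_left (fun j hj => ?_)
    have hj9 : j < 9 := List.mem_range.mp hj
    have hcat := pvCatIdx_lt s
    have hmod : (init.modify (pvCatIdx s) (· ++ [s])).getD j []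
        = if pvCatIdx s = j then init.getD j [] ++ [s] else init.getD j [] := by
      have hlt : j < init.length := by omega
      have hlt2 : j < (init.modify (pvCatIdx s) (· ++ [s])).length := by
        rw [List.length_modify]; omega
      rw [List.getD_eq_getElem?_getD, List.getElem?_eq_getElem hlt2,
        List.getD_eq_getElem?_getD, List.getElem?_eq_getElem hlt]
      simp only [Option.getD_some]
      exact List.getElem_modify _ _ _ _ hlt2
    rw [hmod, List.filter_cons]
    by_cases hc : pvCatIdx s = j
    · rw [if_pos hc, if_pos (by simpa using hc), List.append_assoc, List.singleton_append]
    · rw [if_neg hc, if_neg (by simpa using hc)]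

theorem pvBuckets_eq_filters (stories : List (List (String × String))) :
    pvBuckets stories = (List.range 9).map (fun j => stories.filter (fun s => pvCatIdx s == j)) := by
  unfold pvBuckets
  have hrep : List.replicate (pvKwLists.length + 1) ([] : List (List (String × String)))
      = List.replicate 9 [] := rfl
  rw [hrep, pvFoldBuckets_eq stories (List.replicate 9 []) (by simp)]
  refine List.map_congr_left (fun j hj => ?_)
  rw [List.getD_eq_getElem?_getD, List.getElem?_replicate]
  simp [List.mem_range.mp hj]

set_option maxHeartbeats 1000000 in
theorem pvDec_filter :
    ∀ (rest : List (List (String × String))) (seen : PySem.Dict Int Int)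
      (keyed : List (Int × Int × List (String × String))),
    (∀ jn : Nat, jn < 9 →
      seen.getD (jn : Int) 0 = ((keyed.filter (fun t => t.2.1 == (jn : Int))).length : Int)) →
    ∀ jn : Nat, jn < 9 →
    ((rest.foldl pvDecStep (seen, keyed)).2).filter (fun t => t.2.1 == (jn : Int))
      = keyed.filter (fun t => t.2.1 == (jn : Int))
        ++ ((rest.filter (fun s => pvCatIdx s == jn)).zipIdx
              ((keyed.filter (fun t => t.2.1 == (jn : Int))).length)).map
            (fun p => ((p.2 : Int), (jn : Int), p.1)) := by
  intro rest
  induction rest with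
  | nil => intro seen keyed _ jn _; simp
  | cons s t ih =>
    intro seen keyed hseen jn hjn
    rw [List.foldl_cons]
    have hj0 : pvCatIdx s < 9 := pvCatIdx_lt s
    have hstep : pvDecStep (seen, keyed) s
        = (seen.insert (pvCatIdx s : Int) (seen.getD (pvCatIdx s : Int) 0 + 1),
           keyed ++ [(seen.getD (pvCatIdx s : Int) 0, (pvCatIdx s : Int), s)]) := rfl
    rw [hstep]
    set j0 := pvCatIdx s with hj0def
    set r := seen.getD (j0 : Int) 0 with hrdef
    set keyed' := keyed ++ [(r, (j0 : Int), s)] with hkdef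
    have hfiltK : ∀ m : Nat, keyed'.filter (fun t => t.2.1 == (m : Int))
        = keyed.filter (fun t => t.2.1 == (m : Int))
          ++ if j0 = m then [(r, (j0 : Int), s)] else [] := by
      intro m
      rw [hkdef, List.filter_append]
      congr 1
      by_cases hm : j0 = m
      · subst hm
        simp
      · rw [if_neg hm]
        simp only [List.filter_cons, List.filter_nil]
        rw [if_neg (by simp only [beq_iff_eq]; exact_mod_cast hm)]
    have hseen' : ∀ m : Nat, m < 9 →
        (seen.insert (j0 : Int) (r + 1)).getD (m : Int) 0
          = ((keyed'.filter (fun t => t.2.1 == (m : Int))).length : Int) := by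
      intro m hm
      by_cases hm0 : j0 = m
      · subst hm0
        rw [PySem.Dict.getD_insert_self, hfiltK j0, if_pos rfl, List.length_append,
          hrdef, hseen j0 hj0]
        simp only [List.length_cons, List.length_nil]
        push_cast
        omega
      · rw [PySem.Dict.getD_insert_of_ne _ _ _ (fun he => hm0 (Nat.cast_inj.mp he).symm),
          hfiltK m, if_neg hm0, List.append_nil]
        exact hseen m hm
    rw [ih _ _ hseen' jn hjn, hfiltK jn]
    by_cases hc : j0 = jn
    · subst hc
      rw [if_pos rfl, List.filter_cons, if_pos (by simp [hj0def]), List.zipIdx_cons, List.map_cons]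
      rw [List.length_append, List.length_cons, List.length_nil]
      simp only [List.append_assoc, List.singleton_append]
      rw [hseen j0 hj0] at hrdef
      have : r = ((keyed.filter (fun t => t.2.1 == (j0 : Int))).length : Int) := hrdef
      rw [this]
    · rw [if_neg hc, List.append_nil, List.filter_cons,
        if_neg (by simp only [beq_iff_eq]; exact fun he => hc (by exact_mod_cast he))]

theorem pvDec_mem :
    ∀ (rest : List (List (String × String))) (seen : PySem.Dict Int Int)
      (keyed : List (Int × Int × List (String × String))),
    (∀ t ∈ keyed, ∃ jn : Nat, jn < 9 ∧ t.2.1 = (jn : Int)) →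
    ∀ t ∈ (rest.foldl pvDecStep (seen, keyed)).2, ∃ jn : Nat, jn < 9 ∧ t.2.1 = (jn : Int) := by
  intro rest
  induction rest with
  | nil => intro seen keyed h; exact h
  | cons s t ih =>
    intro seen keyed h
    rw [List.foldl_cons]
    refine ih _ _ (fun e he => ?_)
    rcases List.mem_append.mp he with h1 | h2
    · exact h e h1
    · have : e = (seen.getD (pvCatIdx s : Int) 0, (pvCatIdx s : Int), s) := by simpa using h2
      exact ⟨pvCatIdx s, pvCatIdx_lt s, by rw [this]⟩

theorem pvKeyed_perm (stories : List (List (String × String))) :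
    ((stories.foldl pvDecStep (PySem.Dict.mk [], [])).2).Perm (pvDCols stories).flatten := by
  set keyed := (stories.foldl pvDecStep (PySem.Dict.mk [], [])).2 with hk
  have hmem : ∀ t ∈ keyed, ∃ jn : Nat, jn < 9 ∧ t.2.1 = (jn : Int) :=
    pvDec_mem stories _ [] (by intro t ht; simp at ht)
  have hids : ((List.range 9).map (fun n : Nat => (n : Int))).Nodup := by decide
  have hin : ∀ t ∈ keyed, t.2.1 ∈ (List.range 9).map (fun n : Nat => (n : Int)) := by
    intro t ht
    obtain ⟨jn, hjn, he⟩ := hmem t ht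
    exact he ▸ List.mem_map_of_mem (List.mem_range.mpr hjn)
  have hperm := pvPerm_flatten_filter (fun t => t.2.1) keyed _ hids hin
  have hcols : ((List.range 9).map (fun n : Nat => (n : Int))).map
      (fun j => keyed.filter (fun t => t.2.1 == j)) = pvDCols stories := by
    rw [pvDCols, List.map_map]
    refine List.map_congr_left (fun jn hjn => ?_)
    have h9 := List.mem_range.mp hjn
    show keyed.filter (fun t => t.2.1 == (jn : Int)) = pvDCol stories jn
    rw [hk, pvDec_filter stories (PySem.Dict.mk []) [] (fun m _ => rfl) jn h9]
    simp [pvDCol]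
  rw [hcols] at hperm
  exact hperm

def pvColSpec {σ : Type} (r : Int) (c : List (Int × Int × σ)) (j : Int) : Prop :=
  ∀ p (hp : p < c.length), ((c.get ⟨p, hp⟩).1 = r + p ∧ (c.get ⟨p, hp⟩).2.1 = j)

theorem pvForall₂_mem_left {α β : Type} {R : α → β → Prop} :
    ∀ {cols : List α} {js : List β}, List.Forall₂ R cols js → ∀ c ∈ cols, ∃ j ∈ js, R c j := by
  intro cols js h
  induction h with
  | nil => intro c hc; simp at hc
  | cons hcj hrest ih =>
    intro c hc
    rcases List.mem_cons.mp hc with rfl | hc'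
    · exact ⟨_, List.mem_cons_self, hcj⟩
    · obtain ⟨j, hj, hR⟩ := ih c hc'
      exact ⟨j, List.mem_cons_of_mem _ hj, hR⟩

theorem pvFlatZL_fst_ge {σ : Type} {r : Int} {cols : List (List (Int × Int × σ))} {js : List Int}
    (h : List.Forall₂ (pvColSpec r) cols js) :
    ∀ b ∈ pvFlatZL cols, r ≤ b.1 := by
  intro b hb
  have hb' : b ∈ cols.flatten := (pvFlatZL_perm_flatten cols).mem_iff.mp hb
  obtain ⟨c, hc, hbc⟩ := List.mem_flatten.mp hb'
  obtain ⟨j, _, hR⟩ := pvForall₂_mem_left h c hc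
  obtain ⟨⟨p, hp⟩, rfl⟩ := List.mem_iff_get.mp hbc
  rw [(hR p hp).1]
  omega

theorem pvHeads_mem_spec {σ : Type} {r : Int} :
    ∀ {cols : List (List (Int × Int × σ))} {js : List Int},
    List.Forall₂ (pvColSpec r) cols js →
    ∀ e ∈ cols.filterMap List.head?, e.1 = r ∧ ∃ j ∈ js, e.2.1 = j := by
  intro cols js h
  induction h with
  | nil => intro e he; simp at he
  | @cons c j cs js' h1 h2 ih =>
    intro e he
    cases c with
    | nil =>
      obtain ⟨hb1, j', hj', hb2⟩ := ih e (by simpa [List.filterMap_cons] using he)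
      exact ⟨hb1, j', List.mem_cons_of_mem _ hj', hb2⟩
    | cons x xs =>
      simp only [List.filterMap_cons, List.head?_cons] at he
      rcases List.mem_cons.mp he with rfl | he'
      · have h0 := h1 0 (by simp)
        refine ⟨by simpa using h0.1, j, List.mem_cons_self, by simpa using h0.2⟩
      · obtain ⟨hb1, j', hj', hb2⟩ := ih e he'
        exact ⟨hb1, j', List.mem_cons_of_mem _ hj', hb2⟩

theorem pvHeads_pairwise_spec {σ : Type} {r : Int} :
    ∀ {cols : List (List (Int × Int × σ))} {js : List Int},
    List.Forall₂ (pvColSpec r) cols js → js.Pairwise (· < ·) →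
    (cols.filterMap List.head?).Pairwise (fun a b => toLex (a.1, a.2.1) < toLex (b.1, b.2.1)) := by
  intro cols js h
  induction h with
  | nil => intro _; simp
  | @cons c j cs js' h1 h2 ih =>
    intro hp
    have hp' := (List.pairwise_cons.mp hp).2
    cases c with
    | nil => simpa [List.filterMap_cons] using ih hp'
    | cons x xs =>
      simp only [List.filterMap_cons, List.head?_cons]
      rw [List.pairwise_cons]
      refine ⟨fun b hb => ?_, ih hp'⟩
      obtain ⟨hb1, j', hj', hb2⟩ := pvHeads_mem_spec h2 b hb
      have h0 := h1 0 (by simp)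
      have hx1 : x.1 = r := by simpa using h0.1
      have hx2 : x.2.1 = j := by simpa using h0.2
      rw [Prod.Lex.toLex_lt_toLex]
      right
      refine ⟨by rw [hx1, hb1], ?_⟩
      rw [hx2, hb2]
      exact (List.pairwise_cons.mp hp).1 j' hj'

theorem pvTails_forall₂ {σ : Type} {r : Int} {cols : List (List (Int × Int × σ))} {js : List Int}
    (h : List.Forall₂ (pvColSpec r) cols js) :
    List.Forall₂ (pvColSpec (r + 1)) (cols.map (·.drop 1)) js := by
  rw [List.forall₂_map_left_iff]
  refine h.imp (fun {c j} hc => ?_)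
  intro p hp
  have hplen : p + 1 < c.length := by
    rw [List.length_drop] at hp; omega
  have hget : (c.drop 1).get ⟨p, hp⟩ = c.get ⟨p + 1, hplen⟩ := by
    simp [List.get_eq_getElem]
  rw [hget]
  obtain ⟨h1a, h1b⟩ := hc (p + 1) hplen
  refine ⟨?_, h1b⟩
  rw [h1a]
  push_cast
  ring

theorem pvFlatZL_pairwise {σ : Type} :
    ∀ (n : Nat) (cols : List (List (Int × Int × σ))) (js : List Int) (r : Int),
    (cols.map List.length).sum = n →
    List.Forall₂ (pvColSpec r) cols js →
    js.Pairwise (· < ·) →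
    (pvFlatZL cols).Pairwise (fun a b => toLex (a.1, a.2.1) < toLex (b.1, b.2.1)) := by
  intro n
  induction n using Nat.strong_induction_on with
  | _ n ih =>
    intro cols js r hs hF hp
    by_cases hall : ∀ t ∈ cols, t = []
    · rw [pvFlatZL_eq_nil _ hall]
      exact List.Pairwise.nil
    · rw [pvFlatZL_eq_cons _ hall]
      have hlt := pvSumLen_tails_lt cols (by simpa [pvAll_isEmpty_iff] using hall)
      rw [hs] at hlt
      have hF' := pvTails_forall₂ hF
      rw [List.pairwise_append]
      refine ⟨pvHeads_pairwise_spec hF hp, ih _ hlt _ js (r + 1) rfl hF' hp, ?_⟩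
      intro a ha b hb
      have ha1 : a.1 = r := (pvHeads_mem_spec hF a ha).1
      have hb1 : r + 1 ≤ b.1 := pvFlatZL_fst_ge hF' b hb
      rw [Prod.Lex.toLex_lt_toLex]
      left
      simp only
      omega

theorem pvSorted_eq_flatZL (stories : List (List (String × String))) :
    PySem.List.sorted2 ((stories.foldl pvDecStep (PySem.Dict.mk [], [])).2)
        (fun t => t.1) (fun t => t.2.1)
      = pvFlatZL (pvDCols stories) := by
  rw [pvSorted2_eq_sorted_lex]
  refine PySem.List.sorted_eq_of_perm_of_pairwise_lt _ _ _ ?_ ?_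
  · exact (pvFlatZL_perm_flatten _).trans (pvKeyed_perm stories).symm
  · have hF : List.Forall₂ (pvColSpec 0) (pvDCols stories)
        ((List.range 9).map (fun n : Nat => (n : Int))) := by
      rw [pvDCols, List.forall₂_map_left_iff, List.forall₂_map_right_iff, List.forall₂_same]
      intro jn _ p hp
      have hp' : p < (stories.filter (fun s => pvCatIdx s == jn)).length := by
        simpa [pvDCol] using hp
      constructor
      · simp [pvDCol, List.get_eq_getElem, List.getElem_zipIdx]
      · simp [pvDCol, List.get_eq_getElem, List.getElem_zipIdx]
    have hpair : ((List.range 9).map (fun n : Nat => (n : Int))).Pairwise (· < ·) := by decide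
    exact pvFlatZL_pairwise ((pvDCols stories).map List.length).sum (pvDCols stories) _ 0
      rfl hF hpair

-- ===== VERDICT (by name: the statement is the Claim_ definition above) =====
theorem select_diverse_stories_py_spec : Claim_equal_select_diverse_stories_py := by
  intro stories k _hdom
  unfold Spec_select_diverse_stories_py select_diverse_stories_py select_diverse_stories_py_alt
  by_cases hle : (stories.length : Int) ≤ k
  · rw [if_pos hle, if_pos hle]
  · rw [if_neg hle, if_neg hle]
    -- A-side: the while loop emits the column-major flatten of the non-empty buckets
    show pvWhile (PySem.Dict.mk ((pvACategorize stories).items.filter (fun kv => !kv.2.isEmpty)))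
        k (stories.length + 1)
        (PySem.Dict.mk (((PySem.Dict.mk ((pvACategorize stories).items.filter
          (fun kv => !kv.2.isEmpty))).keys).map (fun c => (c, (0 : Nat))))) []
      = ((PySem.List.sorted2 ((stories.foldl pvDecStep (PySem.Dict.mk [], [])).2)
            (fun t => t.1) (fun t => t.2.1)).take (max 0 k).toNat).map (fun t => t.2.2)
    rw [pvCategorize_eq stories]
    have hitems : (PySem.Dict.mk (pvNames.zip (pvBuckets stories))).items
        = pvNames.zip (pvBuckets stories) := rfl
    rw [hitems]
    have hblen : (pvBuckets stories).length = 9 := pvBuckets_length stories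
    have hnlen : pvNames.length = (pvBuckets stories).length := by rw [hblen]; rfl
    set bs := pvBuckets stories with hbsdef
    set pairs := (pvNames.zip bs).filter (fun kv => !kv.2.isEmpty) with hpairs
    set ne := PySem.Dict.mk pairs with hne
    have hsnd : pairs.map Prod.snd = bs.filter (fun b => !b.isEmpty) :=
      pvFilter_zip_snd (fun b => !b.isEmpty) pvNames bs hnlen
    have hkeys : ne.keys = pairs.map Prod.fst := by
      rw [hne, PySem.Dict.keys_mk]
    have hndk : ne.keys.Nodup := by
      rw [hkeys]
      have hsub : List.Sublist pairs (pvNames.zip bs) := by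
        rw [hpairs]; exact List.filter_sublist
      have : List.Sublist (pairs.map Prod.fst) ((pvNames.zip bs).map Prod.fst) := hsub.map _
      rw [List.map_fst_zip (le_of_eq hnlen)] at this
      exact this.nodup (by decide)
    have hvals : ne.keys.map (fun n => ne.getD n []) = pairs.map Prod.snd := by
      have h0 := congrArg (List.map Prod.snd) (PySem.Dict.items_eq_map_keys ne hndk [])
      have h1 : ne.items = pairs := by rw [hne]
      rw [h1, List.map_map] at h0
      exact h0.symm
    have hidx0 : ∀ n, (PySem.Dict.mk (ne.keys.map (fun c => (c, (0 : Nat))))).getD n 0 = 0 :=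
      fun n => pvGetD_mk_zero ne.keys n
    have hT0 : ne.keys.map (fun n => (ne.getD n []).drop
        ((PySem.Dict.mk (ne.keys.map (fun c => (c, (0 : Nat))))).getD n 0))
        = bs.filter (fun b => !b.isEmpty) := by
      rw [← hsnd, ← hvals]
      exact List.map_congr_left (fun n _ => by rw [hidx0 n, List.drop_zero])
    have hfuel : (pvFlatZL (ne.keys.map (fun n => (ne.getD n []).drop
        ((PySem.Dict.mk (ne.keys.map (fun c => (c, (0 : Nat))))).getD n 0)))).length
        < stories.length + 1 := by
      rw [hT0, pvFlatZL_length, pvSum_filter_nonempty, hbsdef, pvBuckets_sum]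
      omega
    rw [pvWhile_spec ne k hndk (stories.length + 1) _ [] hfuel, hT0]
    have harg : (k - (([] : List (List (String × String))).length : Int)).toNat
        = (max 0 k).toNat := by
      simp only [List.length_nil, Nat.cast_zero]
      omega
    rw [harg, List.nil_append]
    -- B-side: the stable sort by (rank, category) is the same column-major flatten
    rw [pvSorted_eq_flatZL stories]
    rw [hbsdef, pvFlatZL_filter_ne]
    have hmapB : pvBuckets stories = (pvDCols stories).map (List.map (fun t => t.2.2)) := by
      rw [pvBuckets_eq_filters, pvDCols, List.map_map]
      refine List.map_congr_left (fun j _ => ?_)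
      show stories.filter (fun s => pvCatIdx s == j) = (pvDCol stories j).map (fun t => t.2.2)
      rw [pvDCol, List.map_map]
      have hcomp : ((fun t : Int × Int × List (String × String) => t.2.2) ∘
          (fun p : List (String × String) × Nat => ((p.2 : Int), (j : Int), p.1)))
          = Prod.fst := rfl
      rw [hcomp, List.zipIdx_map_fst]
    rw [hmapB, pvFlatZL_map, ← List.map_take]
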